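-- pv_equiv track=rewrite | github.com/Tyunsen/fuseAgent_v2 | aperag/service/answer_graph_service.py | _resolve_linked_rows
-- ===== SOURCE A (Python) =====
-- def _resolve_linked_rows(row_chunk_lookup: dict[str, set[str]], chunk_ids: list[str]) -> list[str]:
--     if not chunk_ids:
--         return []
--     chunk_id_set = set(chunk_ids)
--     return sorted(
--         [
--             row_id
--             for row_id, row_chunk_ids in row_chunk_lookup.items()
--             if row_chunk_ids & chunk_id_set
--         ]
--     )
-- ===== SOURCE B (Python) =====
-- def _resolve_linked_rows(row_chunk_lookup: dict[str, set[str]], chunk_ids: list[str]) -> list[str]: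
--     if not chunk_ids:
--         return []
--     # inverted index: chunk_id -> list of row_ids referencing it
--     index: dict[str, list[str]] = {}
--     for row_id, row_chunk_ids in row_chunk_lookup.items():
--         for chunk_id in row_chunk_ids:
--             index.setdefault(chunk_id, []).append(row_id)
--     matched: set[str] = set()
--     for chunk_id in chunk_ids:
--         rows = index.get(chunk_id)
--         if rows is not None:
--             matched.update(rows)
--     return sorted(matched)
-- ===== Notes on version B (the rewrite author's own statement) =====
-- stated objective: alternative
-- what changed: Replaces the per-row set-intersection scan with an inverted index (chunk_id -> list of row_ids) built once over the lookup, then a gather over the query chunk_ids into a result set, sorting that set.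
import Mathlib
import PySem

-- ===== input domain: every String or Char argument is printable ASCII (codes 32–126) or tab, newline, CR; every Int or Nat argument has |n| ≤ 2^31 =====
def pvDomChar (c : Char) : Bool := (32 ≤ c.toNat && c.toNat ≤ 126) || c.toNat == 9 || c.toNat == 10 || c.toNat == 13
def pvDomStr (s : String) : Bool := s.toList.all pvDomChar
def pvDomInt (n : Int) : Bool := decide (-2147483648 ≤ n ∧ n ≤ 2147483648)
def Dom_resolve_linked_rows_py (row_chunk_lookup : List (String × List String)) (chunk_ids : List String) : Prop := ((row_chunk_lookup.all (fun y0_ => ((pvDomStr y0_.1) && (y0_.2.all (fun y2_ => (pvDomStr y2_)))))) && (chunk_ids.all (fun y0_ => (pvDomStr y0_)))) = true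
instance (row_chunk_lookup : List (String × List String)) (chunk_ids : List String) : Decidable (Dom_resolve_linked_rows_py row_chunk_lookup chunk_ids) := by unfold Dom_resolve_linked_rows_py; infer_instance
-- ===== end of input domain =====

-- B replaces A's per-row set-intersection scan by an inverted index (chunk_id -> row_ids)
-- built once, then a union-gather over the query chunk_ids (objective: alternative algorithm).
-- The dict argument is an assoc list; both ports read it through (PySem.Dict.ofList …).items, the
-- exact items() of the Python dict it encodes (duplicate keys collapse as Python's dict does).

-- ===== PORT A =====
def resolve_linked_rows_py (row_chunk_lookup : List (String × List String)) (chunk_ids : List String) : List String :=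
  if chunk_ids = [] then []
  else
    let chunk_id_set : PySem.Set String := PySem.Set.ofList chunk_ids
    PySem.List.sorted
      (((PySem.Dict.ofList row_chunk_lookup).items.filter
          (fun p => !(PySem.Set.inter p.2 chunk_id_set).isEmpty)).map Prod.fst)
      (fun x => x)

-- ===== PORT B =====
def resolve_linked_rows_py_alt (row_chunk_lookup : List (String × List String)) (chunk_ids : List String) : List String :=
  if chunk_ids = [] then []
  else
    -- inverted index: chunk_id -> list of row_ids (setdefault(c, []).append(r) written back)
    let index : PySem.Dict String (List String) :=
      (PySem.Dict.ofList row_chunk_lookup).items.foldl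
        (fun idx p => p.2.foldl
          (fun idx c => idx.insert c (idx.getD c [] ++ [p.1])) idx)
        PySem.Dict.empty
    let matched : PySem.Set String :=
      chunk_ids.foldl (fun m c =>
        match index.get? c with
        | none => m
        | some rows => PySem.Set.update m rows) PySem.Set.empty
    PySem.List.sorted matched (fun x => x)

-- ===== PRECONDITION & SPEC =====
def Spec_resolve_linked_rows_py (row_chunk_lookup : List (String × List String)) (chunk_ids : List String) (out : List String) : Prop := out = resolve_linked_rows_py_alt row_chunk_lookup chunk_ids
instance (row_chunk_lookup : List (String × List String)) (chunk_ids : List String) (out : List String) : Decidable (Spec_resolve_linked_rows_py row_chunk_lookup chunk_ids out) := by unfold Spec_resolve_linked_rows_py; infer_instance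

-- ===== CLAIM (what is proved, stated in full; the proofs are below) =====
def Claim_equal_resolve_linked_rows_py : Prop := ∀ (row_chunk_lookup : List (String × List String)) (chunk_ids : List String), Dom_resolve_linked_rows_py row_chunk_lookup chunk_ids → Spec_resolve_linked_rows_py row_chunk_lookup chunk_ids (resolve_linked_rows_py row_chunk_lookup chunk_ids)

-- ===== LEMMAS AND PROOFS =====

-- membership in the per-row inner loop of the index build
theorem pv_inner_mem (s : List String) (d : PySem.Dict String (List String)) (r0 c r : String) :
    r ∈ (s.foldl (fun idx c => idx.insert c (idx.getD c [] ++ [r0])) d).getD c []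
      ↔ r ∈ d.getD c [] ∨ (c ∈ s ∧ r = r0) := by
  induction s generalizing d with
  | nil => simp
  | cons a s ih =>
    simp only [List.foldl_cons, ih]
    by_cases hca : c = a
    · subst hca
      simp [PySem.Dict.getD_insert_self]
      tauto
    · simp [PySem.Dict.getD_insert_of_ne _ _ _ hca, hca]

-- membership in a bucket of the fully built index
theorem pv_index_mem (L : List (String × List String)) (d : PySem.Dict String (List String)) (c r : String) :
    r ∈ (L.foldl (fun idx p => p.2.foldl
            (fun idx c => idx.insert c (idx.getD c [] ++ [p.1])) idx) d).getD c []
      ↔ r ∈ d.getD c [] ∨ ∃ p ∈ L, c ∈ p.2 ∧ r = p.1 := by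
  induction L generalizing d with
  | nil => simp
  | cons p L ih =>
    simp only [List.foldl_cons, ih, pv_inner_mem]
    constructor
    · rintro (⟨h | ⟨hc, hr⟩⟩ | ⟨q, hq, hcq, hrq⟩)
      · exact Or.inl h
      · exact Or.inr ⟨p, List.mem_cons_self, hc, hr⟩
      · exact Or.inr ⟨q, List.mem_cons_of_mem _ hq, hcq, hrq⟩
    · rintro (h | ⟨q, hq, hcq, hrq⟩)
      · exact Or.inl (Or.inl h)
      · rcases List.mem_cons.mp hq with rfl | hq'
        · exact Or.inl (Or.inr ⟨hcq, hrq⟩)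
        · exact Or.inr ⟨q, hq', hcq, hrq⟩

-- membership after the union-gather over chunk_ids
theorem pv_gather_mem (cs : List String) (idx : PySem.Dict String (List String)) (m : PySem.Set String) (r : String) :
    r ∈ cs.foldl (fun m c =>
        match idx.get? c with
        | none => m
        | some rows => PySem.Set.update m rows) m
      ↔ r ∈ m ∨ ∃ c ∈ cs, r ∈ idx.getD c [] := by
  induction cs generalizing m with
  | nil => simp
  | cons a cs ih =>
    simp only [List.foldl_cons]
    rcases h : idx.get? a with _ | rows
    · have ha : idx.getD a [] = [] := by
        rw [PySem.Dict.getD_eq_get?_getD, h]; rfl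
      rw [ih]
      constructor
      · rintro (hm | ⟨c, hc, hr⟩)
        · exact Or.inl hm
        · exact Or.inr ⟨c, List.mem_cons_of_mem _ hc, hr⟩
      · rintro (hm | ⟨c, hc, hr⟩)
        · exact Or.inl hm
        · rcases List.mem_cons.mp hc with rfl | hc'
          · rw [ha] at hr; cases hr
          · exact Or.inr ⟨c, hc', hr⟩
    · have ha : idx.getD a [] = rows := by
        rw [PySem.Dict.getD_eq_get?_getD, h]; rfl
      rw [ih]
      simp only [PySem.Set.mem_update]
      constructor
      · rintro (⟨hm | hr⟩ | ⟨c, hc, hr⟩)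
        · exact Or.inl hm
        · exact Or.inr ⟨a, List.mem_cons_self, ha ▸ hr⟩
        · exact Or.inr ⟨c, List.mem_cons_of_mem _ hc, hr⟩
      · rintro (hm | ⟨c, hc, hr⟩)
        · exact Or.inl (Or.inl hm)
        · rcases List.mem_cons.mp hc with rfl | hc'
          · exact Or.inl (Or.inr (ha ▸ hr))
          · exact Or.inr ⟨c, hc', hr⟩

-- the gathered set is duplicate-free
theorem pv_gather_nodup (cs : List String) (idx : PySem.Dict String (List String)) (m : PySem.Set String)
    (hm : m.Nodup) :
    (cs.foldl (fun m c =>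
        match idx.get? c with
        | none => m
        | some rows => PySem.Set.update m rows) m).Nodup := by
  induction cs generalizing m with
  | nil => exact hm
  | cons a cs ih =>
    simp only [List.foldl_cons]
    rcases idx.get? a with _ | rows
    · exact ih _ hm
    · exact ih _ (PySem.Set.nodup_update _ _ hm)

-- A's filter condition is "some chunk of the row is queried"
theorem pv_cond_iff (p : String × List String) (chunk_ids : List String) :
    ((!(PySem.Set.inter p.2 (PySem.Set.ofList chunk_ids)).isEmpty) = true)
      ↔ ∃ c ∈ p.2, c ∈ chunk_ids := by
  rw [Bool.not_eq_eq_eq_not, Bool.not_true, List.isEmpty_eq_false_iff_exists_mem]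
  constructor
  · rintro ⟨x, hx⟩
    rcases (PySem.Set.mem_inter _ _ _).mp hx with ⟨h1, h2⟩
    exact ⟨x, h1, (PySem.Set.mem_ofList _ _).mp h2⟩
  · rintro ⟨c, h1, h2⟩
    exact ⟨c, (PySem.Set.mem_inter _ _ _).mpr ⟨h1, (PySem.Set.mem_ofList _ _).mpr h2⟩⟩

-- ===== VERDICT (by name: the statement is the Claim_ definition above) =====
theorem resolve_linked_rows_py_spec : Claim_equal_resolve_linked_rows_py := by
  intro row_chunk_lookup chunk_ids _
  unfold Spec_resolve_linked_rows_py resolve_linked_rows_py resolve_linked_rows_py_alt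
  by_cases hcs : chunk_ids = []
  · simp [hcs]
  · simp only [hcs, if_false]
    set L := (PySem.Dict.ofList row_chunk_lookup).items with hL
    apply PySem.List.sorted_eq_sorted_of_perm _ _ _ (fun _ _ h => h)
    -- the filtered key list is a rearrangement of the gathered set
    have hkeys : (L.map Prod.fst).Nodup := by
      have := PySem.Dict.nodup_keys_ofList (κ := String) (ν := List String) row_chunk_lookup
      simpa [PySem.Dict.keys] using this
    have hA : ((L.filter (fun p => !(PySem.Set.inter p.2 (PySem.Set.ofList chunk_ids)).isEmpty)).map Prod.fst).Nodup :=
      hkeys.sublist (List.Sublist.map _ List.filter_sublist)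
    have hB := pv_gather_nodup chunk_ids
      (L.foldl (fun idx p => p.2.foldl
          (fun idx c => idx.insert c (idx.getD c [] ++ [p.1])) idx) PySem.Dict.empty)
      PySem.Set.empty List.nodup_nil
    rw [List.perm_ext_iff_of_nodup hA hB]
    intro r
    rw [pv_gather_mem]
    simp only [PySem.Set.empty_eq, List.not_mem_nil, false_or, List.mem_map, List.mem_filter]
    constructor
    · rintro ⟨p, ⟨hpL, hq⟩, hpr⟩
      rcases (pv_cond_iff p chunk_ids).mp hq with ⟨c, hcp, hcq⟩
      exact ⟨c, hcq, (pv_index_mem _ _ _ _).mpr (Or.inr ⟨p, hpL, hcp, hpr.symm⟩)⟩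
    · rintro ⟨c, hcq, hr⟩
      rcases (pv_index_mem _ _ _ _).mp hr with h | ⟨p, hpL, hcp, hrp⟩
      · simp [PySem.Dict.getD_empty] at h
      · exact ⟨p, ⟨hpL, (pv_cond_iff p chunk_ids).mpr ⟨c, hcp, hcq⟩⟩, hrp.symm⟩
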